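-- pv_equiv track=rewrite | github.com/JovanaAleksic/genome-algos | counts_consolidation.py | find_matching_fragment
-- ===== SOURCE A (Python) =====
-- from typing import List, Dict, Set, Tuple
--
-- def find_matching_fragment(protein: str, pos: int, fragment_lookup: Dict[str, List[Tuple[str, int]]]) -> Tuple[str, int]:
--     """Find matching real fragment using the lookup dictionary."""
--     if protein not in fragment_lookup:
--         return None
--
--     candidates = fragment_lookup[protein]
--     for candidate_protein, candidate_pos in candidates:
--         if candidate_pos == pos:
--             # Return the base position (without offset)
--             base_pos = None
--             for offset in range(3):  # max_offset + 1
--                 if (candidate_protein, candidate_pos - offset) in candidates: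
--                     base_pos = candidate_pos - offset
--                     break
--                 if (candidate_protein, candidate_pos + offset) in candidates:
--                     base_pos = candidate_pos + offset
--                     break
--             if base_pos is not None:
--                 return (candidate_protein, base_pos)
--     return None
-- ===== SOURCE B (Python) =====
-- def find_matching_fragment(protein, pos, fragment_lookup):
--     """B: build a position->fragment index once (first occurrence per position wins),
--     then answer by a dict lookup. Correct because A's inner offset loop always succeeds
--     at offset 0 (the candidate tuple is itself in the list), so A returns the first
--     candidate whose position equals pos."""
--     if protein not in fragment_lookup:
--         return None
--     index = {}
--     for cand_protein, cand_pos in fragment_lookup[protein]: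
--         if cand_pos not in index:
--             index[cand_pos] = (cand_protein, cand_pos)
--     return index.get(pos)
-- ===== Notes on version B (the rewrite author's own statement) =====
-- stated objective: alternative
-- what changed: Replaced A's scan-for-pos with its nested offset membership loop by a staged index: B builds a position->fragment dictionary once (first occurrence per position) and answers by a single dict lookup, relying on the fact that A's offset loop always succeeds at offset 0.
import Mathlib
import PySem

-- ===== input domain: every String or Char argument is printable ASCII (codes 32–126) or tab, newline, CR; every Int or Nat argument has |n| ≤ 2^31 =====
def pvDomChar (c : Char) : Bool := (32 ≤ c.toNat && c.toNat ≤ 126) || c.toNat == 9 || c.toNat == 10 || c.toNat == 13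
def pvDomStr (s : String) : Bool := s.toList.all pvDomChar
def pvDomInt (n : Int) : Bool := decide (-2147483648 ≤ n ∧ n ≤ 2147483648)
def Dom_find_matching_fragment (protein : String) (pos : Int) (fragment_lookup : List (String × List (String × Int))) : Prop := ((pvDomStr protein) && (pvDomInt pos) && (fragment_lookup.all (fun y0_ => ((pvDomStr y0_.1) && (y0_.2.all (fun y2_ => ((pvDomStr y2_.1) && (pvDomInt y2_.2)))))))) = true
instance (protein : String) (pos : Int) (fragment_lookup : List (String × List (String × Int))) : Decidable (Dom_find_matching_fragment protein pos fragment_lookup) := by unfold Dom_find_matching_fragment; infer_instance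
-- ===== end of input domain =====

-- B builds a position→fragment index once and answers by dict lookup, instead of A's
-- scan-for-pos with a nested offset membership loop (which always succeeds at offset 0); objective: alternative.

-- ===== PORT A =====
-- inner 'for offset in range(3)' loop of A, with its two membership tests and breaks
def fmfOffsetLoop (candidates : List (String × Int)) (cp : String) (cpos : Int) : List Int → Option Int
  | [] => none
  | o :: rest =>
    if candidates.contains (cp, cpos - o) then some (cpos - o)
    else if candidates.contains (cp, cpos + o) then some (cpos + o)
    else fmfOffsetLoop candidates cp cpos rest

-- outer 'for candidate_protein, candidate_pos in candidates' loop of A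
def fmfScan (pos : Int) (candidates : List (String × Int)) : List (String × Int) → Option (String × Int)
  | [] => none
  | (cp, cpos) :: rest =>
    if cpos == pos then
      match fmfOffsetLoop candidates cp cpos (PySem.List.pyRange 0 3 1) with
      | some b => some (cp, b)
      | none => fmfScan pos candidates rest
    else fmfScan pos candidates rest

def find_matching_fragment (protein : String) (pos : Int) (fragment_lookup : List (String × List (String × Int))) : Option (String × Int) :=
  match fragment_lookup.lookup protein with
  | none => none
  | some candidates => fmfScan pos candidates candidates

-- ===== PORT B =====
-- the 'index' dict of Source B: insert only when the position key is absent (first occurrence wins)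
def fmfIndex (cands : List (String × Int)) : PySem.Dict Int (String × Int) :=
  cands.foldl (fun d p => if d.contains p.2 then d else d.insert p.2 (p.1, p.2)) PySem.Dict.empty

def find_matching_fragment_alt (protein : String) (pos : Int) (fragment_lookup : List (String × List (String × Int))) : Option (String × Int) :=
  match fragment_lookup.lookup protein with
  | none => none
  | some candidates => (fmfIndex candidates).get? pos

-- ===== PRECONDITION & SPEC =====
def Spec_find_matching_fragment (protein : String) (pos : Int) (fragment_lookup : List (String × List (String × Int))) (out : Option (String × Int)) : Prop := out = find_matching_fragment_alt protein pos fragment_lookup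
instance (protein : String) (pos : Int) (fragment_lookup : List (String × List (String × Int))) (out : Option (String × Int)) : Decidable (Spec_find_matching_fragment protein pos fragment_lookup out) := by unfold Spec_find_matching_fragment; infer_instance

-- ===== CLAIM (what is proved, stated in full; the proofs are below) =====
def Claim_equal_find_matching_fragment : Prop := ∀ (protein : String) (pos : Int) (fragment_lookup : List (String × List (String × Int))), Dom_find_matching_fragment protein pos fragment_lookup → Spec_find_matching_fragment protein pos fragment_lookup (find_matching_fragment protein pos fragment_lookup)

-- ===== LEMMAS AND PROOFS =====

-- A's offset loop always succeeds immediately at offset 0 when the candidate is in the list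
lemma fmfOffsetLoop_zero {candidates : List (String × Int)} {cp : String} {cpos : Int}
    (h : (cp, cpos) ∈ candidates) :
    fmfOffsetLoop candidates cp cpos (PySem.List.pyRange 0 3 1) = some cpos := by
  have hr : PySem.List.pyRange 0 3 1 = [0, 1, 2] := by decide
  rw [hr]
  simp [fmfOffsetLoop, h]

-- A's scan therefore returns the first candidate whose position equals pos
lemma fmfScan_eq_find (pos : Int) (candidates : List (String × Int)) :
    ∀ rest : List (String × Int), (∀ x ∈ rest, x ∈ candidates) →
      fmfScan pos candidates rest = rest.find? (fun p => p.2 == pos) := by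
  intro rest
  induction rest with
  | nil => intro _; rfl
  | cons hd tl ih =>
    intro hsub
    obtain ⟨cp, cpos⟩ := hd
    have hmem : (cp, cpos) ∈ candidates := hsub _ (List.mem_cons_self ..)
    have htl : ∀ x ∈ tl, x ∈ candidates := fun x hx => hsub x (List.mem_cons_of_mem _ hx)
    by_cases h : cpos = pos
    · subst h
      simp [fmfScan, List.find?, fmfOffsetLoop_zero hmem]
    · have hb : (cpos == pos) = false := by simp [h]
      simp [fmfScan, List.find?, hb, ih htl]

-- B's index lookup is the first candidate whose position equals pos
lemma fmfIndex_get?_aux (pos : Int) :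
    ∀ (l : List (String × Int)) (d : PySem.Dict Int (String × Int)),
      (l.foldl (fun d p => if d.contains p.2 then d else d.insert p.2 (p.1, p.2)) d).get? pos
        = match d.get? pos with
          | some v => some v
          | none => l.find? (fun p => p.2 == pos) := by
  intro l
  induction l with
  | nil =>
    intro d
    cases h : d.get? pos <;> simp [List.foldl, h]
  | cons hd tl ih =>
    intro d
    obtain ⟨cp, cpos⟩ := hd
    simp only [List.foldl]
    by_cases hc : d.contains cpos = true
    · rw [if_pos hc, ih]
      cases hg : d.get? pos with
      | some v => simp
      | none =>
        have hne : cpos ≠ pos := by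
          intro he
          rw [PySem.Dict.contains_eq_isSome_get?, he, hg] at hc
          simp at hc
        have hb : (cpos == pos) = false := by simp [hne]
        simp [List.find?, hb]
    · rw [if_neg hc, ih]
      by_cases he : pos = cpos
      · subst he
        have hg : d.get? pos = none := by
          rw [PySem.Dict.get?_eq_none_iff_contains]
          simpa using hc
        rw [PySem.Dict.get?_insert, if_pos rfl, hg]
        simp [List.find?]
      · rw [PySem.Dict.get?_insert, if_neg he]
        cases hg : d.get? pos with
        | some v => simp
        | none =>
          have hb : (cpos == pos) = false := by simp; exact fun h => he h.symm
          simp [List.find?, hb]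

lemma fmfIndex_get? (pos : Int) (cands : List (String × Int)) :
    (fmfIndex cands).get? pos = cands.find? (fun p => p.2 == pos) := by
  unfold fmfIndex
  rw [fmfIndex_get?_aux]
  simp

-- ===== VERDICT (by name: the statement is the Claim_ definition above) =====
theorem find_matching_fragment_spec : Claim_equal_find_matching_fragment := by
  intro protein pos fragment_lookup _
  unfold Spec_find_matching_fragment find_matching_fragment find_matching_fragment_alt
  cases fragment_lookup.lookup protein with
  | none => rfl
  | some candidates =>
    show fmfScan pos candidates candidates = (fmfIndex candidates).get? pos
    rw [fmfScan_eq_find pos candidates candidates (fun _ h => h), fmfIndex_get? pos candidates]
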